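-- pv_equiv track=rewrite | github.com/rybarczykj/popular-lyrics | webapp.py | representsWord
-- ===== SOURCE A (Python) =====
-- def representsWord(w):
--     if w.startswith("\'") and w.endswith("\'") and len(w)>1:
--         return representsWord(w[1:-1])
--     elif w.startswith("\"") and w.endswith("\"") and len(w)>1:
--         return representsWord(w[1:-1])
--     elif isinstance(w, str):
--         return w
--     else:
--         return False
-- ===== SOURCE B (Python) =====
-- def representsWord(w):
--     n = len(w)
--     i = 0
--     while 2 * i + 1 < n and w[i] == w[n - 1 - i] and w[i] in ("'", '"'):
--         i += 1
--     return w[i:n - i]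
-- ===== Notes on version B (the rewrite author's own statement) =====
-- stated objective: alternative
-- what changed: B computes the number of strippable matching-quote pairs with a single two-pointer scan and removes them with one slice, instead of A's recursion that rebuilds a new string for every peeled pair.
import Mathlib
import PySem

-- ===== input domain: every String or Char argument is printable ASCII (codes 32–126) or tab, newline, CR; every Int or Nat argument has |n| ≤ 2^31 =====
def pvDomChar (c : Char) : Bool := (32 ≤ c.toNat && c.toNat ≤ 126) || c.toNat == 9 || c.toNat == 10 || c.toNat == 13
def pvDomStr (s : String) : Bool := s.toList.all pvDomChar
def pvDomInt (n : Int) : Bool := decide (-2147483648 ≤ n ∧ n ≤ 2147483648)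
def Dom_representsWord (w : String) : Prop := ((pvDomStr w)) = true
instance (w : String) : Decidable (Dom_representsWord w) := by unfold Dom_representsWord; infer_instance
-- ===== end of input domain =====

-- B replaces A's per-pair recursion (which rebuilds a string each step) by one two-pointer
-- scan counting matching surrounding quote pairs followed by a single slice (alternative
-- decomposition; same observable behaviour).


-- ===== PORT A =====
-- A over the character list: w.startswith("'") = l[0]? = some '\'', w.endswith("'") = l.getLast? = some '\'',
-- w[1:-1] = (l.drop 1).dropLast (exact for len(w) > 1, the only case it is taken in).
def representsWordAux (l : List Char) : List Char :=
  if _h1 : l[0]? = some '\'' ∧ l.getLast? = some '\'' ∧ 1 < l.length then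
    representsWordAux ((l.drop 1).dropLast)
  else if _h2 : l[0]? = some '"' ∧ l.getLast? = some '"' ∧ 1 < l.length then
    representsWordAux ((l.drop 1).dropLast)
  else l
termination_by l.length
decreasing_by
  · simp only [List.length_dropLast, List.length_drop]; omega
  · simp only [List.length_dropLast, List.length_drop]; omega

def representsWord (w : String) : String := String.mk (representsWordAux w.toList)

-- ===== PORT B =====
-- the while loop of Source B: advance i while 2*i+1 < n and w[i] == w[n-1-i] and w[i] in ("'", '"')
def stripDepth (l : List Char) (n i : Nat) : Nat :=
  if _h : 2 * i + 1 < n ∧ l[i]? = l[n - 1 - i]? ∧ (l[i]? = some '\'' ∨ l[i]? = some '"') then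
    stripDepth l n (i + 1)
  else i
termination_by n - i
decreasing_by omega

-- w[i:n-i] = (l.drop i).take (n - i - i)
def representsWord_alt (w : String) : String :=
  let l := w.toList
  let n := l.length
  let i := stripDepth l n 0
  String.mk ((l.drop i).take (n - i - i))

-- ===== PRECONDITION & SPEC =====
def Spec_representsWord (w : String) (out : String) : Prop := out = representsWord_alt w
instance (w : String) (out : String) : Decidable (Spec_representsWord w out) := by unfold Spec_representsWord; infer_instance

-- ===== CLAIM (what is proved, stated in full; the proofs are below) =====
def Claim_equal_representsWord : Prop := ∀ (w : String), Dom_representsWord w → Spec_representsWord w (representsWord w)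

-- ===== LEMMAS AND PROOFS =====

lemma core_get (l : List Char) (j : Nat) :
    ((l.drop 1).dropLast)[j]? = if j + 2 < l.length then l[j + 1]? else none := by
  simp only [List.getElem?_dropLast, List.length_drop, List.getElem?_drop]
  split_ifs with h1 h2 h2 <;> first | (congr 1; omega) | rfl

lemma stripDepth_shift (l : List Char) (h : 1 < l.length) :
    ∀ i, stripDepth l l.length (i + 1) = stripDepth ((l.drop 1).dropLast) (l.length - 2) i + 1 := by
  intro i
  have hm : ∀ k i, l.length - i ≤ k →
      stripDepth l l.length (i + 1) = stripDepth ((l.drop 1).dropLast) (l.length - 2) i + 1 := by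
    intro k
    induction k with
    | zero =>
      intro i hi
      conv_lhs => rw [stripDepth]
      conv_rhs => rw [stripDepth]
      rw [dif_neg (by rintro ⟨hb, -⟩; omega), dif_neg (by rintro ⟨hb, -⟩; omega)]
    | succ k ih =>
      intro i hi
      conv_lhs => rw [stripDepth]
      conv_rhs => rw [stripDepth]
      by_cases hb : 2 * (i + 1) + 1 < l.length
      · have h1 : ((l.drop 1).dropLast)[i]? = l[i + 1]? := by
          rw [core_get, if_pos (by omega)]
        have h2 : ((l.drop 1).dropLast)[l.length - 2 - 1 - i]? = l[l.length - 1 - (i + 1)]? := by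
          rw [core_get, if_pos (by omega)]
          congr 1; omega
        rw [h1, h2]
        by_cases hc : l[i + 1]? = l[l.length - 1 - (i + 1)]? ∧
            (l[i + 1]? = some '\'' ∨ l[i + 1]? = some '"')
        · rw [dif_pos ⟨hb, hc⟩, dif_pos ⟨by omega, hc⟩]
          exact ih (i + 1) (by omega)
        · rw [dif_neg (by rintro ⟨-, hc'⟩; exact hc hc'),
              dif_neg (by rintro ⟨-, hc'⟩; exact hc hc')]
      · rw [dif_neg (by rintro ⟨hb', -⟩; exact hb hb'),
            dif_neg (by rintro ⟨hb', -⟩; omega)]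
  exact hm (l.length - i) i le_rfl

lemma aux_eq (l : List Char) :
    representsWordAux l =
      (l.drop (stripDepth l l.length 0)).take (l.length - stripDepth l l.length 0 - stripDepth l l.length 0) := by
  induction l using representsWordAux.induct with
  | case1 l h1 ih =>
    have hlen : 1 < l.length := h1.2.2
    have hlast : l.getLast? = l[l.length - 1]? := List.getLast?_eq_getElem?
    have hcond : 2 * 0 + 1 < l.length ∧ l[0]? = l[l.length - 1 - 0]? ∧
        (l[0]? = some '\'' ∨ l[0]? = some '"') := by
      refine ⟨by omega, ?_, Or.inl h1.1⟩
      rw [h1.1, Nat.sub_zero, ← hlast, h1.2.1]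
    have hcl : ((l.drop 1).dropLast).length = l.length - 2 := by
      simp only [List.length_dropLast, List.length_drop]
      omega
    have hstrip : stripDepth l l.length 0 = stripDepth ((l.drop 1).dropLast) (l.length - 2) 0 + 1 := by
      conv_lhs => rw [stripDepth]
      rw [dif_pos hcond]
      exact stripDepth_shift l hlen 0
    rw [representsWordAux, dif_pos h1, ih]
    simp only [hcl]
    rw [hstrip]
    set d := stripDepth ((l.drop 1).dropLast) (l.length - 2) 0 with hd
    apply List.ext_getElem?
    intro j
    rw [List.getElem?_take, List.getElem?_take]
    split_ifs with p1 p2 p2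
    · rw [List.getElem?_drop, List.getElem?_drop, core_get, if_pos (by omega)]
      congr 1
      omega
    · exfalso; omega
    · exfalso; omega
    · rfl
  | case2 l h1 h2 ih =>
    have hlen : 1 < l.length := h2.2.2
    have hlast : l.getLast? = l[l.length - 1]? := List.getLast?_eq_getElem?
    have hcond : 2 * 0 + 1 < l.length ∧ l[0]? = l[l.length - 1 - 0]? ∧
        (l[0]? = some '\'' ∨ l[0]? = some '"') := by
      refine ⟨by omega, ?_, Or.inr h2.1⟩
      rw [h2.1, Nat.sub_zero, ← hlast, h2.2.1]
    have hcl : ((l.drop 1).dropLast).length = l.length - 2 := by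
      simp only [List.length_dropLast, List.length_drop]
      omega
    have hstrip : stripDepth l l.length 0 = stripDepth ((l.drop 1).dropLast) (l.length - 2) 0 + 1 := by
      conv_lhs => rw [stripDepth]
      rw [dif_pos hcond]
      exact stripDepth_shift l hlen 0
    rw [representsWordAux, dif_neg h1, dif_pos h2, ih]
    simp only [hcl]
    rw [hstrip]
    set d := stripDepth ((l.drop 1).dropLast) (l.length - 2) 0 with hd
    apply List.ext_getElem?
    intro j
    rw [List.getElem?_take, List.getElem?_take]
    split_ifs with p1 p2 p2
    · rw [List.getElem?_drop, List.getElem?_drop, core_get, if_pos (by omega)]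
      congr 1
      omega
    · exfalso; omega
    · exfalso; omega
    · rfl
  | case3 l h1 h2 =>
    have hlast : l.getLast? = l[l.length - 1]? := List.getLast?_eq_getElem?
    have h0 : stripDepth l l.length 0 = 0 := by
      conv_lhs => rw [stripDepth]
      rw [dif_neg]
      rintro ⟨hb, heq, hq⟩
      have heq' : l[0]? = l[l.length - 1]? := by simpa using heq
      rcases hq with hq | hq
      · exact h1 ⟨hq, by rw [hlast, ← heq', hq], by omega⟩
      · exact h2 ⟨hq, by rw [hlast, ← heq', hq], by omega⟩
    rw [representsWordAux, dif_neg h1, dif_neg h2, h0]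
    simp

-- ===== VERDICT (by name: the statement is the Claim_ definition above) =====
theorem representsWord_spec : Claim_equal_representsWord := by
  intro w _
  show representsWord w = representsWord_alt w
  rw [representsWord, representsWord_alt, aux_eq]
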